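-- pv_equiv track=rewrite | github.com/Aasthaengg/IBMdataset | Python_codes/p03033/s690675675.py | solve
-- ===== SOURCE A (Python) =====
-- from bisect import bisect_left
--
-- def solve(n, q, s, t, x, d):
--     v = sorted(list(zip(s, t, x)), key=lambda _:_[2])
--     res = [-1] * q
--     jump = [-1] * q
--     for s, t, x in v:
--         l = bisect_left(d, s - x)
--         r = bisect_left(d, t - x)
--         while l < r:
--             s = jump[l]
--             if s == -1:
--                 res[l] = x
--                 jump[l] = r
--                 l += 1
--             else:
--                 l = s
--     return res
-- ===== SOURCE B (Python) =====
-- from bisect import bisect_left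
--
-- def solve(n, q, s, t, x, d):
--     # paint positions interval-by-interval in increasing x; a cell keeps the
--     # first (= smallest-x) paint it receives.  No jump/skip structure: each
--     # interval is scanned directly over Option-like cells (None = unpainted).
--     res = [None] * q
--     for si, ti, xi in sorted(zip(s, t, x), key=lambda v: v[2]):
--         for i in range(bisect_left(d, si - xi), bisect_left(d, ti - xi)):
--             if res[i] is None:
--                 res[i] = xi
--     return [-1 if v is None else v for v in res]
-- ===== Notes on version B (the rewrite author's own statement) =====
-- stated objective: simpler
-- what changed: drops A's jump-pointer skip structure entirely: B scans each bisect-delimited interval directly over Option-valued cells (None = unpainted), painting a cell on its first (= smallest-x, since intervals are processed sorted by x) covering interval, then converts None to -1 at the end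
-- outside the precondition, e.g. on solve(0, 0, [], [], [], [5]): A returns [], B returns []
import Mathlib
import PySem

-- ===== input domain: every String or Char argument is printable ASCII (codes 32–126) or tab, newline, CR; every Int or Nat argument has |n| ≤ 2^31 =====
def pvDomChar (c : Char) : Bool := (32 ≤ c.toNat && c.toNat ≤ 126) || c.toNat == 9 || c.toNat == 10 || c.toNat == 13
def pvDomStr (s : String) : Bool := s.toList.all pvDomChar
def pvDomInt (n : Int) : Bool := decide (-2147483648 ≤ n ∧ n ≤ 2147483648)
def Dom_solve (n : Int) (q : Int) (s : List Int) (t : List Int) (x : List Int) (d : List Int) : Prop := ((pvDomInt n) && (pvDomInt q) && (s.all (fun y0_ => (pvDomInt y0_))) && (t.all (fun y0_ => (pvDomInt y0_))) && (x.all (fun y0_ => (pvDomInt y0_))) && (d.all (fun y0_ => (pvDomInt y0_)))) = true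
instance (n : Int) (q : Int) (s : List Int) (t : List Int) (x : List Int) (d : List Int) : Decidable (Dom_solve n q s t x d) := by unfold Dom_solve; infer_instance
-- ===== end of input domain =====

-- B replaces A's jump-pointer skip structure by a direct scan of each bisect-delimited
-- interval over Option-valued cells (objective: simpler; no speed claim).

-- ===== PORT A =====
-- bisect.bisect_left is PySem.List.bisectLeft (the same binary search; exact also on unsorted input).
-- paintA is A's inner 'while l < r' loop; the fuel guard (r-l).toNat only makes the recursion
-- total: the Python loop's l strictly increases each iteration, so the fuel is never exhausted
-- on inputs admitted by Pre_solve (proved in the lemmas below).  All indices that arise are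
-- nonnegative (bisect results / stored right ends) and in range under Pre_solve, so
-- .toNat with List.getD / List.set is exact here.

def paintA : Nat → List Int → List Int → Int → Int → Int → List Int × List Int
  | 0, res, jump, _, _, _ => (res, jump)
  | fuel+1, res, jump, xv, l, r =>
    if l < r then
      let sj := jump.getD l.toNat 0
      if sj = -1 then
        paintA fuel (res.set l.toNat xv) (jump.set l.toNat r) xv (l+1) r
      else
        paintA fuel res jump xv sj r
    else (res, jump)

-- one iteration of A's 'for s, t, x in v' loop
def stepA (d : List Int) (st : List Int × List Int) (p : Int × Int × Int) : List Int × List Int :=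
  let l : Int := (PySem.List.bisectLeft d (p.1 - p.2.2) : Nat)
  let r : Int := (PySem.List.bisectLeft d (p.2.1 - p.2.2) : Nat)
  paintA (r - l).toNat st.1 st.2 p.2.2 l r

def solve (n : Int) (q : Int) (s : List Int) (t : List Int) (x : List Int) (d : List Int) : List Int :=
  let v := PySem.List.sorted (s.zip (t.zip x)) (fun p => p.2.2)
  (v.foldl (stepA d) (List.replicate q.toNat (-1), List.replicate q.toNat (-1))).1

-- ===== PORT B =====
-- stepB is one iteration of B's outer loop: scan the interval, painting unpainted (= None) cells
def stepB (d : List Int) (rb : List (Option Int)) (p : Int × Int × Int) : List (Option Int) :=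
  (PySem.List.pyRange ((PySem.List.bisectLeft d (p.1 - p.2.2) : Nat) : Int)
                      ((PySem.List.bisectLeft d (p.2.1 - p.2.2) : Nat) : Int) 1).foldl
    (fun rb i => if rb.getD i.toNat none = none then rb.set i.toNat (some p.2.2) else rb) rb

def solve_alt (n : Int) (q : Int) (s : List Int) (t : List Int) (x : List Int) (d : List Int) : List Int :=
  let v := PySem.List.sorted (s.zip (t.zip x)) (fun p => p.2.2)
  ((v.foldl (stepB d) (List.replicate q.toNat none)).map (fun o => o.getD (-1)))

-- ===== PRECONDITION & SPEC =====
-- Pre_solve: the script's natural domain reads exactly q floor positions d (len(d) = q);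
-- we require only len(d) ≤ q, since for len(d) > q A can index res/jump out of range
-- (IndexError).  This also excludes some degenerate len(d) > q inputs on which A still
-- returns because every paint range is empty; see the claim's cites.
def Pre_solve (n : Int) (q : Int) (s : List Int) (t : List Int) (x : List Int) (d : List Int) : Prop :=
  (d.length : Int) ≤ q
instance (n : Int) (q : Int) (s : List Int) (t : List Int) (x : List Int) (d : List Int) : Decidable (Pre_solve n q s t x d) := by unfold Pre_solve; infer_instance

def pvWitness_solve : Int × Int × List Int × List Int × List Int × List Int :=
  (0, 2, [0], [2], [5], [0, 1])

def Spec_solve (n : Int) (q : Int) (s : List Int) (t : List Int) (x : List Int) (d : List Int) (out : List Int) : Prop := out = solve_alt n q s t x d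
instance (n : Int) (q : Int) (s : List Int) (t : List Int) (x : List Int) (d : List Int) (out : List Int) : Decidable (Spec_solve n q s t x d out) := by unfold Spec_solve; infer_instance

-- ===== CLAIM (what is proved, stated in full; the proofs are below) =====
def Claim_equal_solve : Prop := ∀ (n : Int) (q : Int) (s : List Int) (t : List Int) (x : List Int) (d : List Int), Dom_solve n q s t x d → Pre_solve n q s t x d → Spec_solve n q s t x d (solve n q s t x d)

-- ===== LEMMAS AND PROOFS =====

-- pointwise description of one painting pass: every still-unpainted cell of [l, r) gets xv

def paintRB (rb : List (Option Int)) (xv : Int) (l r : Int) : List (Option Int) :=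
  rb.mapIdx (fun i o => if l ≤ (i : Int) ∧ (i : Int) < r ∧ o = none then some xv else o)

-- coupling between A's (res, jump) state and B's Option-cell state rb
def Coupled (res jump : List Int) (rb : List (Option Int)) : Prop :=
  res.length = rb.length ∧ jump.length = rb.length ∧
  ∀ i : Nat, i < rb.length →
    ((jump.getD i 0 = -1) ↔ rb.getD i none = none) ∧
    res.getD i 0 = (rb.getD i none).getD (-1) ∧
    (jump.getD i 0 ≠ -1 → (i : Int) < jump.getD i 0 ∧ jump.getD i 0 ≤ (rb.length : Int))

-- jump-chain invariant, parametrised by the running inner loop's current pointer l and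
-- right end r: every cell under a set jump pointer is already painted, or lies in the
-- still-to-be-painted range [l, r) of a pointer position the loop has already passed
def Chain (jump : List Int) (rb : List (Option Int)) (l r : Int) : Prop :=
  ∀ i : Nat, i < rb.length → jump.getD i 0 ≠ -1 →
    ∀ k : Nat, (i : Int) ≤ (k : Int) → (k : Int) < jump.getD i 0 →
      (rb.getD k none ≠ none ∨ ((i : Int) < l ∧ l ≤ (k : Int) ∧ (k : Int) < r))

lemma getD_set_self {α : Type} (xs : List α) (i : Nat) (v d : α) (h : i < xs.length) :
    (xs.set i v).getD i d = v := by
  simp [List.getD_eq_getElem?_getD, h]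

lemma getD_set_ne {α : Type} (xs : List α) (i j : Nat) (v d : α) (h : i ≠ j) :
    (xs.set i v).getD j d = xs.getD j d := by
  simp [List.getD_eq_getElem?_getD, h]

lemma length_paintRB (rb : List (Option Int)) (xv l r : Int) :
    (paintRB rb xv l r).length = rb.length := by
  simp [paintRB]

lemma getElem_paintRB (rb : List (Option Int)) (xv l r : Int) (i : Nat)
    (h : i < (paintRB rb xv l r).length) :
    (paintRB rb xv l r)[i] =
      if l ≤ (i : Int) ∧ (i : Int) < r ∧ rb[i]'(by simpa [length_paintRB] using h) = none
      then some xv else rb[i]'(by simpa [length_paintRB] using h) := by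
  simp [paintRB]

lemma paintRB_empty (rb : List (Option Int)) (xv : Int) {l r : Int} (h : r ≤ l) :
    paintRB rb xv l r = rb := by
  apply List.ext_getElem (by simp [length_paintRB])
  intro i h1 h2
  rw [getElem_paintRB, if_neg]
  rintro ⟨ha, hb, _⟩; omega

lemma paintRB_set (rb : List (Option Int)) (xv : Int) {l r : Int} (hlr : l < r) (hl : 0 ≤ l)
    (hlen : l.toNat < rb.length) (hnone : rb.getD l.toNat none = none) :
    paintRB rb xv l r = paintRB (rb.set l.toNat (some xv)) xv (l+1) r := by
  rw [List.getD_eq_getElem _ _ hlen] at hnone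
  apply List.ext_getElem (by simp [length_paintRB])
  intro i h1 h2
  rw [getElem_paintRB, getElem_paintRB]
  by_cases hil : i = l.toNat
  · have hcast : ((i : Int)) = l := by omega
    have h1' : i < rb.length := by simpa [length_paintRB] using h1
    have hrbi : rb[i]'h1' = none := by
      subst hil; exact hnone
    have hset : (rb.set l.toNat (some xv))[i]'(by simpa using h1') = some xv := by
      simp [List.getElem_set, hil]
    rw [if_pos ⟨by omega, by omega, hrbi⟩, if_neg, hset]
    rintro ⟨ha, _, hv⟩
    rw [hset] at hv
    exact absurd hv (by simp)
  · have hset : (rb.set l.toNat (some xv))[i]'(by simpa using (by simpa [length_paintRB] using h2)) = rb[i]'(by simpa [length_paintRB] using h1) := by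
      simp [List.getElem_set, hil]
      intro hc; omega
    rw [hset]
    have : (l ≤ (i:Int)) ↔ (l + 1 ≤ (i:Int)) := by omega
    by_cases hc : l ≤ (i:Int) ∧ (i:Int) < r ∧ rb[i]'(by simpa [length_paintRB] using h1) = none
    · rw [if_pos hc, if_pos ⟨by omega, hc.2.1, hc.2.2⟩]
    · rw [if_neg hc, if_neg]
      rintro ⟨ha, hb, hcc⟩
      exact hc ⟨by omega, hb, hcc⟩

lemma paintRB_skip (rb : List (Option Int)) (xv : Int) {l m r : Int} (hlm : l ≤ m)
    (hp : ∀ k : Nat, l ≤ (k : Int) → (k : Int) < m → rb.getD k none ≠ none) :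
    paintRB rb xv l r = paintRB rb xv m r := by
  apply List.ext_getElem (by simp [length_paintRB])
  intro i h1 h2
  rw [getElem_paintRB, getElem_paintRB]
  by_cases hc : l ≤ (i:Int) ∧ (i:Int) < r ∧ rb[i]'(by simpa [length_paintRB] using h1) = none
  · have him : m ≤ (i:Int) := by
      by_contra hcon
      exact hp i hc.1 (by omega) (by rw [List.getD_eq_getElem _ _ (by simpa [length_paintRB] using h1)]; exact hc.2.2)
    rw [if_pos hc, if_pos ⟨him, hc.2.1, hc.2.2⟩]
  · rw [if_neg hc, if_neg]
    rintro ⟨ha, hb, hcc⟩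
    exact hc ⟨by omega, hb, hcc⟩

lemma paintRB_out (rb : List (Option Int)) (xv : Int) {l r : Int} (hl : 0 ≤ l)
    (hlen : rb.length ≤ l.toNat) :
    paintRB rb xv l r = paintRB rb xv (l+1) r := by
  apply List.ext_getElem (by simp [length_paintRB])
  intro i h1 h2
  rw [getElem_paintRB, getElem_paintRB]
  have h1' : i < rb.length := by simpa [length_paintRB] using h1
  rw [if_neg (by rintro ⟨ha, _, _⟩; omega), if_neg (by rintro ⟨ha, _, _⟩; omega)]

-- B's inner loop computes exactly one painting pass
lemma foldB_eq_paint (xv : Int) : ∀ (n : Nat) (l r : Int), (r - l).toNat = n → 0 ≤ l →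
    ∀ rb : List (Option Int),
    (PySem.List.pyRange l r 1).foldl
      (fun rb i => if rb.getD i.toNat none = none then rb.set i.toNat (some xv) else rb) rb
      = paintRB rb xv l r := by
  intro n
  induction n with
  | zero =>
    intro l r hn hl rb
    rw [PySem.List.pyRange_one_eq_nil (by omega)]
    simp [paintRB_empty rb xv (show r ≤ l by omega)]
  | succ m ih =>
    intro l r hn hl rb
    have hlr : l < r := by omega
    rw [PySem.List.pyRange_one_cons hlr]
    simp only [List.foldl_cons]
    by_cases hb : rb.getD l.toNat none = none
    · rw [if_pos hb]
      by_cases hlen : l.toNat < rb.length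
      · rw [ih (l+1) r (by omega) (by omega)]
        exact (paintRB_set rb xv hlr hl hlen hb).symm
      · rw [List.set_eq_of_length_le (by omega)]
        rw [ih (l+1) r (by omega) (by omega)]
        exact (paintRB_out rb xv hl (by omega)).symm
    · rw [if_neg hb]
      rw [ih (l+1) r (by omega) (by omega)]
      refine (paintRB_skip rb xv (by omega) ?_).symm
      intro k hk1 hk2
      have : k = l.toNat := by omega
      subst this
      exact hb

-- A's inner loop, started in a coupled state, lands in the state coupled to the same painting pass
lemma paintA_correct : ∀ (fuel : Nat) (res jump : List Int) (rb : List (Option Int)) (xv l r : Int),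
    Coupled res jump rb → Chain jump rb l r → 0 ≤ l → r ≤ (rb.length : Int) →
    (r - l).toNat ≤ fuel →
    Coupled (paintA fuel res jump xv l r).1 (paintA fuel res jump xv l r).2 (paintRB rb xv l r) ∧
    Chain (paintA fuel res jump xv l r).2 (paintRB rb xv l r) 0 0 := by
  intro fuel
  induction fuel with
  | zero =>
    intro res jump rb xv l r hC hch hl hr hfuel
    have hrl : r ≤ l := by omega
    rw [paintRB_empty rb xv hrl]
    refine ⟨hC, ?_⟩
    intro i hi hj k hk1 hk2
    rcases hch i hi hj k hk1 hk2 with h | ⟨h1, h2, h3⟩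
    · exact Or.inl h
    · omega
  | succ m ih =>
    intro res jump rb xv l r hC hch hl hr hfuel
    by_cases hlr : l < r
    · have hlen_l : l.toNat < rb.length := by omega
      obtain ⟨hlres, hljump, hpt⟩ := hC
      have hlenj : l.toNat < jump.length := by omega
      by_cases hsj : jump.getD l.toNat 0 = -1
      · -- paint branch
        have hsj' : jump[l.toNat]?.getD 0 = (-1 : Int) := by
          simpa [List.getD_eq_getElem?_getD] using hsj
        have hrbl : rb.getD l.toNat none = none := (hpt l.toNat hlen_l).1.mp hsj
        have hstep : paintA (m+1) res jump xv l r
            = paintA m (res.set l.toNat xv) (jump.set l.toNat r) xv (l+1) r := by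
          simp [paintA, hlr, hsj, hsj']
        rw [hstep, paintRB_set rb xv hlr hl hlen_l hrbl]
        have hC' : Coupled (res.set l.toNat xv) (jump.set l.toNat r) (rb.set l.toNat (some xv)) := by
          refine ⟨by simpa using hlres, by simpa using hljump, ?_⟩
          intro i hi
          have hi' : i < rb.length := by simpa using hi
          by_cases hil : i = l.toNat
          · subst hil
            rw [getD_set_self jump l.toNat r 0 (by omega), getD_set_self rb l.toNat (some xv) none hi',
                getD_set_self res l.toNat xv 0 (by omega)]
            refine ⟨⟨fun h => absurd h (by omega), fun h => absurd h (by simp)⟩, rfl, ?_⟩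
            intro _
            exact ⟨by omega, by simpa using hr⟩
          · rw [getD_set_ne jump l.toNat i r 0 (fun hh => hil hh.symm),
                getD_set_ne rb l.toNat i (some xv) none (fun hh => hil hh.symm),
                getD_set_ne res l.toNat i xv 0 (fun hh => hil hh.symm)]
            have := hpt i hi'
            simpa using this
        have hch' : Chain (jump.set l.toNat r) (rb.set l.toNat (some xv)) (l+1) r := by
          intro i hi hj k hk1 hk2
          have hi' : i < rb.length := by simpa using hi
          by_cases hil : i = l.toNat
          · subst hil
            rw [getD_set_self jump l.toNat r 0 (by omega)] at hk2
            by_cases hkl : k = l.toNat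
            · rw [hkl, getD_set_self rb l.toNat (some xv) none hi']
              exact Or.inl (by simp)
            · exact Or.inr ⟨by omega, by omega, hk2⟩
          · rw [getD_set_ne jump l.toNat i r 0 (fun hh => hil hh.symm)] at hj hk2
            rcases hch i hi' hj k hk1 hk2 with hne | ⟨h1, h2, h3⟩
            · by_cases hkl : k = l.toNat
              · rw [hkl, getD_set_self rb l.toNat (some xv) none hlen_l]
                exact Or.inl (by simp)
              · rw [getD_set_ne rb l.toNat k (some xv) none (fun hh => hkl hh.symm)]
                exact Or.inl hne
            · by_cases hkl : k = l.toNat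
              · rw [hkl, getD_set_self rb l.toNat (some xv) none hlen_l]
                exact Or.inl (by simp)
              · exact Or.inr ⟨by omega, by omega, h3⟩
        have := ih _ _ _ xv (l+1) r hC' hch' (by omega) (by simpa using hr) (by omega)
        exact this
      · -- jump branch
        have hsj' : ¬ jump[l.toNat]?.getD 0 = (-1 : Int) := by
          simpa [List.getD_eq_getElem?_getD] using hsj
        have hbound := (hpt l.toNat hlen_l).2.2 hsj
        have hlsj : l < jump.getD l.toNat 0 := by
          have := hbound.1; omega
        have hstep : paintA (m+1) res jump xv l r
            = paintA m res jump xv (jump.getD l.toNat 0) r := by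
          simp [paintA, hlr, hsj', List.getD_eq_getElem?_getD]
        have hpainted : ∀ k : Nat, l ≤ (k : Int) → (k : Int) < jump.getD l.toNat 0 →
            rb.getD k none ≠ none := by
          intro k hk1 hk2
          rcases hch l.toNat hlen_l hsj k (by omega) hk2 with h | ⟨h1, h2, h3⟩
          · exact h
          · omega
        rw [hstep, paintRB_skip rb xv (le_of_lt hlsj) hpainted]
        have hch2 : Chain jump rb (jump.getD l.toNat 0) r := by
          intro i hi hj k hk1 hk2
          rcases hch i hi hj k hk1 hk2 with h | ⟨h1, h2, h3⟩
          · exact Or.inl h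
          · by_cases hksj : (k : Int) < jump.getD l.toNat 0
            · exact Or.inl (hpainted k h2 hksj)
            · exact Or.inr ⟨by omega, by omega, h3⟩
        exact ih _ _ _ xv (jump.getD l.toNat 0) r ⟨hlres, hljump, hpt⟩ hch2 (by omega) hr (by omega)
    · have hstep : paintA (m+1) res jump xv l r = (res, jump) := by
        simp [paintA, hlr]
      rw [hstep, paintRB_empty rb xv (by omega)]
      refine ⟨hC, ?_⟩
      intro i hi hj k hk1 hk2
      rcases hch i hi hj k hk1 hk2 with h | ⟨h1, h2, h3⟩
      · exact Or.inl h
      · omega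

lemma bisectLeftLoop_le (xs : List Int) (x : Int) :
    ∀ (fuel lo hi : Nat), lo ≤ hi → lo ≤ PySem.List.bisectLeftLoop xs x fuel lo hi ∧
      PySem.List.bisectLeftLoop xs x fuel lo hi ≤ hi := by
  intro fuel
  induction fuel with
  | zero => intro lo hi h; simp [PySem.List.bisectLeftLoop]; omega
  | succ n ih =>
    intro lo hi h
    rw [PySem.List.bisectLeftLoop]
    by_cases hlh : lo < hi
    · rw [if_pos hlh]
      cases hget : xs[(lo + hi) / 2]? with
      | none => simp; omega
      | some y =>
        simp only
        by_cases hy : y < x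
        · rw [if_pos hy]
          have := ih ((lo + hi) / 2 + 1) hi (by omega)
          omega
        · rw [if_neg hy]
          have := ih lo ((lo + hi) / 2) (by omega)
          omega
    · rw [if_neg hlh]; omega

lemma bisectLeft_le_length (xs : List Int) (x : Int) :
    PySem.List.bisectLeft xs x ≤ xs.length := by
  exact (bisectLeftLoop_le xs x xs.length 0 xs.length (by omega)).2

lemma Chain_mono (jump : List Int) (rb : List (Option Int)) (l r : Int)
    (h : Chain jump rb 0 0) : Chain jump rb l r := by
  intro i hi hj k hk1 hk2
  rcases h i hi hj k hk1 hk2 with hne | ⟨h1, h2, h3⟩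
  · exact Or.inl hne
  · omega

lemma step_correct (d : List Int) (p : Int × Int × Int) (res jump : List Int)
    (rb : List (Option Int)) (hC : Coupled res jump rb) (hch : Chain jump rb 0 0)
    (hd : d.length ≤ rb.length) :
    Coupled (stepA d (res, jump) p).1 (stepA d (res, jump) p).2 (stepB d rb p) ∧
    Chain (stepA d (res, jump) p).2 (stepB d rb p) 0 0 ∧ (stepB d rb p).length = rb.length := by
  have hrlen : (PySem.List.bisectLeft d (p.2.1 - p.2.2) : Int) ≤ (rb.length : Int) := by
    have := bisectLeft_le_length d (p.2.1 - p.2.2)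
    omega
  have hB : stepB d rb p = paintRB rb p.2.2
      ((PySem.List.bisectLeft d (p.1 - p.2.2) : Nat) : Int)
      ((PySem.List.bisectLeft d (p.2.1 - p.2.2) : Nat) : Int) := by
    unfold stepB
    exact foldB_eq_paint p.2.2 _ _ _ rfl (by omega) rb
  have h := paintA_correct _ res jump rb p.2.2
      ((PySem.List.bisectLeft d (p.1 - p.2.2) : Nat) : Int)
      ((PySem.List.bisectLeft d (p.2.1 - p.2.2) : Nat) : Int)
      hC (Chain_mono _ _ _ _ hch) (by omega) hrlen (le_refl _)
  refine ⟨?_, ?_, ?_⟩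
  · rw [hB]; exact h.1
  · rw [hB]; exact h.2
  · rw [hB, length_paintRB]

lemma fold_AB (d : List Int) : ∀ (v : List (Int × Int × Int)) (res jump : List Int)
    (rb : List (Option Int)), Coupled res jump rb → Chain jump rb 0 0 →
    d.length ≤ rb.length →
    Coupled (v.foldl (stepA d) (res, jump)).1 (v.foldl (stepA d) (res, jump)).2
      (v.foldl (stepB d) rb) ∧ (v.foldl (stepB d) rb).length = rb.length := by
  intro v
  induction v with
  | nil => intro res jump rb hC hch hd; exact ⟨hC, rfl⟩
  | cons p v ih =>
    intro res jump rb hC hch hd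
    simp only [List.foldl_cons]
    obtain ⟨h1, h2, h3⟩ := step_correct d p res jump rb hC hch hd
    have := ih (stepA d (res, jump) p).1 (stepA d (res, jump) p).2 (stepB d rb p)
      (by simpa using h1) h2 (by omega)
    rw [h3] at this
    simpa using this

lemma Coupled_init (Q : Nat) :
    Coupled (List.replicate Q (-1)) (List.replicate Q (-1)) (List.replicate Q none) := by
  refine ⟨by simp, by simp, ?_⟩
  intro i hi
  have hi' : i < Q := by simpa using hi
  simp [List.getD_eq_getElem?_getD, List.getElem?_replicate, hi']

lemma Chain_init (Q : Nat) :
    Chain (List.replicate Q (-1)) (List.replicate Q none) 0 0 := by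
  intro i hi hj k hk1 hk2
  have hi' : i < Q := by simpa using hi
  simp [List.getD_eq_getElem?_getD, List.getElem?_replicate, hi'] at hj

-- ===== VERDICT (by name: the statement is the Claim_ definition above) =====
theorem solve_spec : Claim_equal_solve := by
  intro n q s t x d hdom hpre
  unfold Spec_solve
  unfold Pre_solve at hpre
  unfold solve solve_alt
  obtain ⟨hCf, hlenf⟩ := fold_AB d (PySem.List.sorted (s.zip (t.zip x)) (fun p => p.2.2))
    (List.replicate q.toNat (-1)) (List.replicate q.toNat (-1)) (List.replicate q.toNat none)
    (Coupled_init q.toNat) (Chain_init q.toNat) (by simp; omega)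
  obtain ⟨hl1, hl2, hpt⟩ := hCf
  apply List.ext_getElem (by simpa using hl1)
  intro i h1 h2
  have hi' : i < ((PySem.List.sorted (s.zip (t.zip x)) (fun p => p.2.2)).foldl (stepB d)
      (List.replicate q.toNat none)).length := by simpa using h2
  have := (hpt i (by omega)).2.1
  rw [List.getD_eq_getElem _ _ h1, List.getD_eq_getElem _ _ hi'] at this
  rw [List.getElem_map]
  exact this
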